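-- pv_equiv track=rewrite | github.com/JaehoonAhnGit/Portfolio | python_sample_SQLquery.py | select_attributes
-- ===== SOURCE A (Python) =====
-- def select_attributes(args_from_ui):
--   '''
--   Returns a list of attributes
--   Input:
--     args_from_ui(dict): arguments from the user/Django
--   Output:
--     attributes(list): list of attributes
--   '''
--   attributes = ["na"]*10
--
--   for key in args_from_ui:
--     if key in ["terms", "dept", "day", "time_start", "time_end",\
--               "walking_time", "building", "enroll_lower", "enroll_upper"]:
--       attributes[0] ="courses.dept"
--       attributes[1] = "courses.course_num"
--     if key in ["terms", "dept"]:
--       attributes[9] = "courses.title"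
--     if key in ["day", "time_start", "time_end", "walking_time"\
--               "building", "enroll_lower", "enroll_upper"]:
--       attributes[2] = "sections.section_num"
--       attributes[3] = "meeting_patterns.day"
--       attributes[4] = "meeting_patterns.time_start"
--       attributes[5] = "meeting_patterns.time_end"
--     if key in ["walking_time", "building"]:
--       attributes[6] = "sections.building_code"
--       attributes[7] = "time_between(a.lat, a.lon, b.lat, b.lon) AS walking_time"
--     if key in ["enroll_lower", "enroll_upper"]:
--       attributes[8] = "sections.enrollment"
--
--   attributes = [att for att in attributes if att != "na"]
--
--   return attributes
-- ===== SOURCE B (Python) =====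
-- def select_attributes(args_from_ui):
--     # Build the result directly, group by group in slot order, instead of
--     # filling a fixed 10-slot array keyed by index.  Each membership list is
--     # copied verbatim from the original (including its accidental
--     # 'walking_time' 'building' literal concatenation), so group membership
--     # is identical.
--     keys = set(args_from_ui)
--     attributes = []
--     if keys & {"terms", "dept", "day", "time_start", "time_end",
--                "walking_time", "building", "enroll_lower", "enroll_upper"}:
--         attributes += ["courses.dept", "courses.course_num"]
--     if keys & {"day", "time_start", "time_end", "walking_timebuilding",
--                "enroll_lower", "enroll_upper"}:
--         attributes += ["sections.section_num", "meeting_patterns.day",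
--                        "meeting_patterns.time_start", "meeting_patterns.time_end"]
--     if keys & {"walking_time", "building"}:
--         attributes += ["sections.building_code",
--                        "time_between(a.lat, a.lon, b.lat, b.lon) AS walking_time"]
--     if keys & {"enroll_lower", "enroll_upper"}:
--         attributes += ["sections.enrollment"]
--     if keys & {"terms", "dept"}:
--         attributes += ["courses.title"]
--     return attributes
-- ===== Notes on version B (the rewrite author's own statement) =====
-- stated objective: simpler
-- what changed: B replaces A's per-key loop over a fixed 10-slot sentinel array (plus a final filter pass) by a direct construction: compute the key set once and append each attribute group, in slot order, guarded by a set-intersection test; membership lists (including the original's 'walking_timebuilding' literal concatenation) are kept verbatim.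
import Mathlib
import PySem

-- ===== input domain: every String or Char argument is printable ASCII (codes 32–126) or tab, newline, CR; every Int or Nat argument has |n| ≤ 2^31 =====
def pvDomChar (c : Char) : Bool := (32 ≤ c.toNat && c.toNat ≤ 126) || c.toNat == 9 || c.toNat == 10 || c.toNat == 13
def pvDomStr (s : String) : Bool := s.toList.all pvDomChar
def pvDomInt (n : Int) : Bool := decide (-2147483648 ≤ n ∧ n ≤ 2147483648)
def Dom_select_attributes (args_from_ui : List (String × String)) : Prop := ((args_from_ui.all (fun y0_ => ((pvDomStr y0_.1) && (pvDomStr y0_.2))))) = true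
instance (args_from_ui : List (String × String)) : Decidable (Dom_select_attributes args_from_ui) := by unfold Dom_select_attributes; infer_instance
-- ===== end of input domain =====

-- B builds the result group by group from the key set instead of filling a 10-slot sentinel
-- array per key and filtering; same return value (simpler decomposition, no speed claim).

-- ===== PORT A =====
-- The body of A's 'for key in args_from_ui' loop, named so the proofs can speak about it.
-- All indices written are literal 0..9 on a length-10 list, so plain List.set is exact for
-- 'attributes[i] = v'.
def pvAStep (attrs : List String) (key : String) : List String :=
  let attrs := if key ∈ ["terms", "dept", "day", "time_start", "time_end",
                         "walking_time", "building", "enroll_lower", "enroll_upper"] then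
      (attrs.set 0 "courses.dept").set 1 "courses.course_num"
    else attrs
  let attrs := if key ∈ ["terms", "dept"] then attrs.set 9 "courses.title" else attrs
  let attrs := if key ∈ ["day", "time_start", "time_end", "walking_timebuilding",
                         "enroll_lower", "enroll_upper"] then
      ((((attrs.set 2 "sections.section_num").set 3 "meeting_patterns.day").set 4
          "meeting_patterns.time_start").set 5 "meeting_patterns.time_end")
    else attrs
  let attrs := if key ∈ ["walking_time", "building"] then
      (attrs.set 6 "sections.building_code").set 7
        "time_between(a.lat, a.lon, b.lat, b.lon) AS walking_time"
    else attrs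
  if key ∈ ["enroll_lower", "enroll_upper"] then attrs.set 8 "sections.enrollment"
  else attrs

-- Python A iterates over the dict's keys (unique, first-insertion order): PySem.List.dedup of
-- the association list's keys.
def select_attributes (args_from_ui : List (String × String)) : List String :=
  let attributes : List String := List.replicate 10 "na"
  let attributes := (PySem.List.dedup (args_from_ui.map Prod.fst)).foldl pvAStep attributes
  attributes.filter (fun att => att != "na")

-- ===== PORT B =====
-- 'keys & {…}' truthiness = the intersection is non-empty.
def select_attributes_alt (args_from_ui : List (String × String)) : List String :=
  let keys : PySem.Set String := PySem.Set.ofList (args_from_ui.map Prod.fst)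
  let attributes : List String := []
  let attributes := if (PySem.Set.inter keys (PySem.Set.ofList
      ["terms", "dept", "day", "time_start", "time_end",
       "walking_time", "building", "enroll_lower", "enroll_upper"])).isEmpty then attributes
    else attributes ++ ["courses.dept", "courses.course_num"]
  let attributes := if (PySem.Set.inter keys (PySem.Set.ofList
      ["day", "time_start", "time_end", "walking_timebuilding",
       "enroll_lower", "enroll_upper"])).isEmpty then attributes
    else attributes ++ ["sections.section_num", "meeting_patterns.day",
                        "meeting_patterns.time_start", "meeting_patterns.time_end"]
  let attributes := if (PySem.Set.inter keys (PySem.Set.ofList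
      ["walking_time", "building"])).isEmpty then attributes
    else attributes ++ ["sections.building_code",
                        "time_between(a.lat, a.lon, b.lat, b.lon) AS walking_time"]
  let attributes := if (PySem.Set.inter keys (PySem.Set.ofList
      ["enroll_lower", "enroll_upper"])).isEmpty then attributes
    else attributes ++ ["sections.enrollment"]
  let attributes := if (PySem.Set.inter keys (PySem.Set.ofList
      ["terms", "dept"])).isEmpty then attributes
    else attributes ++ ["courses.title"]
  attributes

-- ===== PRECONDITION & SPEC =====
def Spec_select_attributes (args_from_ui : List (String × String)) (out : List String) : Prop := out = select_attributes_alt args_from_ui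
instance (args_from_ui : List (String × String)) (out : List String) : Decidable (Spec_select_attributes args_from_ui out) := by unfold Spec_select_attributes; infer_instance

-- ===== CLAIM (what is proved, stated in full; the proofs are below) =====
def Claim_equal_select_attributes : Prop := ∀ (args_from_ui : List (String × String)), Dom_select_attributes args_from_ui → Spec_select_attributes args_from_ui (select_attributes args_from_ui)

-- ===== LEMMAS AND PROOFS =====

-- Group-membership abbreviations for the proofs (the lists are the ports' literals).
def pvB1 (args : List (String × String)) : Bool :=
  (args.map Prod.fst).any (fun k => decide (k ∈ ["terms", "dept", "day", "time_start",
    "time_end", "walking_time", "building", "enroll_lower", "enroll_upper"]))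
def pvB2 (args : List (String × String)) : Bool :=
  (args.map Prod.fst).any (fun k => decide (k ∈ ["terms", "dept"]))
def pvB3 (args : List (String × String)) : Bool :=
  (args.map Prod.fst).any (fun k => decide (k ∈ ["day", "time_start", "time_end",
    "walking_timebuilding", "enroll_lower", "enroll_upper"]))
def pvB4 (args : List (String × String)) : Bool :=
  (args.map Prod.fst).any (fun k => decide (k ∈ ["walking_time", "building"]))
def pvB5 (args : List (String × String)) : Bool :=
  (args.map Prod.fst).any (fun k => decide (k ∈ ["enroll_lower", "enroll_upper"]))

-- The 10-slot state of A's loop, parametrised by which groups have been hit so far.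
def pvSt (b1 b2 b3 b4 b5 : Bool) : List String :=
  [if b1 then "courses.dept" else "na",
   if b1 then "courses.course_num" else "na",
   if b3 then "sections.section_num" else "na",
   if b3 then "meeting_patterns.day" else "na",
   if b3 then "meeting_patterns.time_start" else "na",
   if b3 then "meeting_patterns.time_end" else "na",
   if b4 then "sections.building_code" else "na",
   if b4 then "time_between(a.lat, a.lon, b.lat, b.lon) AS walking_time" else "na",
   if b5 then "sections.enrollment" else "na",
   if b2 then "courses.title" else "na"]

-- Both results, as a function of the five hit-bits.
def pvTarget (b1 b2 b3 b4 b5 : Bool) : List String :=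
  (if b1 then ["courses.dept", "courses.course_num"] else []) ++
  (if b3 then ["sections.section_num", "meeting_patterns.day",
               "meeting_patterns.time_start", "meeting_patterns.time_end"] else []) ++
  (if b4 then ["sections.building_code",
               "time_between(a.lat, a.lon, b.lat, b.lon) AS walking_time"] else []) ++
  (if b5 then ["sections.enrollment"] else []) ++
  (if b2 then ["courses.title"] else [])

theorem pvStep (b1 b2 b3 b4 b5 : Bool) (k : String) :
    pvAStep (pvSt b1 b2 b3 b4 b5) k
    = pvSt (b1 || decide (k ∈ ["terms", "dept", "day", "time_start", "time_end",
                   "walking_time", "building", "enroll_lower", "enroll_upper"]))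
           (b2 || decide (k ∈ ["terms", "dept"]))
           (b3 || decide (k ∈ ["day", "time_start", "time_end", "walking_timebuilding",
                   "enroll_lower", "enroll_upper"]))
           (b4 || decide (k ∈ ["walking_time", "building"]))
           (b5 || decide (k ∈ ["enroll_lower", "enroll_upper"])) := by
  by_cases h1 : k ∈ ["terms", "dept", "day", "time_start", "time_end",
      "walking_time", "building", "enroll_lower", "enroll_upper"] <;>
    by_cases h2 : k ∈ ["terms", "dept"] <;>
      by_cases h3 : k ∈ ["day", "time_start", "time_end", "walking_timebuilding",
          "enroll_lower", "enroll_upper"] <;>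
        by_cases h4 : k ∈ ["walking_time", "building"] <;>
          by_cases h5 : k ∈ ["enroll_lower", "enroll_upper"] <;>
            simp [pvAStep, pvSt, h1, h2, h3, h4, h5]

theorem pvFold (l : List String) (b1 b2 b3 b4 b5 : Bool) :
    l.foldl pvAStep (pvSt b1 b2 b3 b4 b5)
    = pvSt (b1 || l.any (fun k => decide (k ∈ ["terms", "dept", "day", "time_start",
             "time_end", "walking_time", "building", "enroll_lower", "enroll_upper"])))
           (b2 || l.any (fun k => decide (k ∈ ["terms", "dept"])))
           (b3 || l.any (fun k => decide (k ∈ ["day", "time_start", "time_end",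
             "walking_timebuilding", "enroll_lower", "enroll_upper"])))
           (b4 || l.any (fun k => decide (k ∈ ["walking_time", "building"])))
           (b5 || l.any (fun k => decide (k ∈ ["enroll_lower", "enroll_upper"]))) := by
  induction l generalizing b1 b2 b3 b4 b5 with
  | nil => simp
  | cons k t ih =>
      rw [List.foldl_cons, pvStep, ih]
      simp [Bool.or_assoc]

theorem pvFilterSt (b1 b2 b3 b4 b5 : Bool) :
    (pvSt b1 b2 b3 b4 b5).filter (fun att => att != "na") = pvTarget b1 b2 b3 b4 b5 := by
  cases b1 <;> cases b2 <;> cases b3 <;> cases b4 <;> cases b5 <;> rfl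

theorem pvAnyDedup (args : List (String × String)) (g : List String) :
    (PySem.List.dedup (args.map Prod.fst)).any (fun k => decide (k ∈ g)) =
      (args.map Prod.fst).any (fun k => decide (k ∈ g)) := by
  rw [Bool.eq_iff_iff]
  simp only [List.any_eq_true, decide_eq_true_eq]
  constructor
  · rintro ⟨x, hx, hg⟩
    exact ⟨x, (PySem.List.mem_dedup _ _).mp hx, hg⟩
  · rintro ⟨x, hx, hg⟩
    exact ⟨x, (PySem.List.mem_dedup _ _).mpr hx, hg⟩

theorem pvA_eq (args : List (String × String)) :
    select_attributes args =
      pvTarget (pvB1 args) (pvB2 args) (pvB3 args) (pvB4 args) (pvB5 args) := by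
  rw [show select_attributes args =
        ((PySem.List.dedup (args.map Prod.fst)).foldl pvAStep
          (pvSt false false false false false)).filter (fun att => att != "na") from rfl]
  rw [pvFold, pvFilterSt]
  simp only [Bool.false_or]
  rw [pvAnyDedup, pvAnyDedup, pvAnyDedup, pvAnyDedup, pvAnyDedup]
  rfl

theorem pvInterEmpty (args : List (String × String)) (g : List String) :
    (PySem.Set.inter (PySem.Set.ofList (args.map Prod.fst)) (PySem.Set.ofList g)).isEmpty =
      !((args.map Prod.fst).any (fun k => decide (k ∈ g))) := by
  rw [Bool.eq_iff_iff]
  simp only [List.isEmpty_iff, List.eq_nil_iff_forall_not_mem, PySem.Set.mem_inter,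
    PySem.Set.mem_ofList, Bool.not_eq_true', List.any_eq_false, decide_eq_true_eq]
  tauto

theorem pvB_eq (args : List (String × String)) :
    select_attributes_alt args =
      pvTarget (pvB1 args) (pvB2 args) (pvB3 args) (pvB4 args) (pvB5 args) := by
  simp only [select_attributes_alt, pvInterEmpty]
  rw [show ((args.map Prod.fst).any (fun k => decide (k ∈ ["terms", "dept", "day",
        "time_start", "time_end", "walking_time", "building", "enroll_lower",
        "enroll_upper"]))) = pvB1 args from rfl,
      show ((args.map Prod.fst).any (fun k => decide (k ∈ ["day", "time_start", "time_end",
        "walking_timebuilding", "enroll_lower", "enroll_upper"]))) = pvB3 args from rfl,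
      show ((args.map Prod.fst).any (fun k => decide (k ∈ ["walking_time", "building"]))) =
        pvB4 args from rfl,
      show ((args.map Prod.fst).any (fun k => decide (k ∈ ["enroll_lower", "enroll_upper"]))) =
        pvB5 args from rfl,
      show ((args.map Prod.fst).any (fun k => decide (k ∈ ["terms", "dept"]))) =
        pvB2 args from rfl]
  cases pvB1 args <;> cases pvB2 args <;> cases pvB3 args <;> cases pvB4 args <;>
    cases pvB5 args <;> rfl

-- ===== VERDICT (by name: the statement is the Claim_ definition above) =====
theorem select_attributes_spec : Claim_equal_select_attributes := by
  intro args _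
  unfold Spec_select_attributes
  rw [pvA_eq, pvB_eq]
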